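-- pv_equiv track=rewrite | github.com/shahriarsiddik/codewars | begin_your_day_with_a_challenge.py | one_two_three
-- ===== SOURCE A (Python) =====
-- def one_two_three(n):
--     if not n:
--         return [0,0]
--     res1 = ''
--     m=n
--     while m>9:
--         res1 += '9'
--         m-=9
--     res1+=str(m)
--     return [int(res1),int(''.join([str(1) for i in range(n)]))]
-- ===== SOURCE B (Python) =====
-- def one_two_three(n):
--     if not n:
--         return [0, 0]
--     last = (n - 1) % 9 + 1
--     nines = (n - last) // 9
--     return [(10 ** nines - 1) * 10 + last, (10 ** n - 1) // 9]
-- ===== Notes on version B (the rewrite author's own statement) =====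
-- stated objective: faster
-- what changed: Replaces the subtract-nine loop and the string building/parsing with closed-form arithmetic: the final digit via a modulus, the count of leading nines via integer division, and the repunit via a power formula.
import Mathlib
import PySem

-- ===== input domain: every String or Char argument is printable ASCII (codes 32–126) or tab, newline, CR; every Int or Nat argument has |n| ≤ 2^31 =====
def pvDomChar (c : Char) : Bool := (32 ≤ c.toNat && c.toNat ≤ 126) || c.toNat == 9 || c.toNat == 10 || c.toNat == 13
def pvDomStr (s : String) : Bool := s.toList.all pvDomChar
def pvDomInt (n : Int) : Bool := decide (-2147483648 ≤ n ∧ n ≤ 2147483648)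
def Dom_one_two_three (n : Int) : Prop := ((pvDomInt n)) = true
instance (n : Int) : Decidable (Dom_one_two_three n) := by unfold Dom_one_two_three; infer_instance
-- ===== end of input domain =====

-- B computes both numbers in closed form (last digit, nine count, repunit) instead of A's subtract-9 loop and string building/parsing.


-- ===== PORT A =====
-- the while-loop of A: 'while m>9: res1 += "9"; m -= 9'
def nineLoop (m : Int) (res1 : List Char) : List Char × Int :=
  if 9 < m then nineLoop (m - 9) (res1 ++ ['9']) else (res1, m)
termination_by m.toNat
decreasing_by omega

-- hand port of Python's int(s): exact on nonempty all-digit strings, which are the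
-- only strings A's code feeds it on Pre_ (PySem.Int.ofStr? has the same value there).
def digitsToInt (cs : List Char) : Int :=
  cs.foldl (fun a c => a * 10 + ((c.toNat : Int) - 48)) 0

def one_two_three (n : Int) : List Int :=
  if n = 0 then [0, 0]
  else
    let p := nineLoop n []                                -- res1 built by the loop, final m
    let res1 := p.1 ++ PySem.Int.toChars p.2              -- res1 += str(m)
    let ones := PySem.Chars.join []
      ((PySem.List.pyRange 0 n 1).map (fun _ => PySem.Int.toChars (1 : Int)))  -- ''.join([str(1) for i in range(n)])
    [digitsToInt res1, digitsToInt ones]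

-- ===== PORT B =====
-- exponents are nonnegative on Pre_, so Python's ** is ^ on Nat-cast exponents
def one_two_three_alt (n : Int) : List Int :=
  if n = 0 then [0, 0]
  else
    let last := PySem.Int.mod (n - 1) 9 + 1
    let nines := PySem.Int.floordiv (n - last) 9
    [(10 ^ nines.toNat - 1) * 10 + last, PySem.Int.floordiv (10 ^ n.toNat - 1) 9]

-- ===== PRECONDITION & SPEC =====
-- Pre_ excludes exactly the inputs where A raises: on negative n, int('') of the empty join raises ValueError.
def Pre_one_two_three (n : Int) : Prop := 0 ≤ n
instance (n : Int) : Decidable (Pre_one_two_three n) := by unfold Pre_one_two_three; infer_instance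
def pvWitness_one_two_three : Int := 25

def Spec_one_two_three (n : Int) (out : List Int) : Prop := out = one_two_three_alt n
instance (n : Int) (out : List Int) : Decidable (Spec_one_two_three n out) := by unfold Spec_one_two_three; infer_instance

-- ===== CLAIM (what is proved, stated in full; the proofs are below) =====
def Claim_equal_one_two_three : Prop := ∀ (n : Int), Dom_one_two_three n → Pre_one_two_three n → Spec_one_two_three n (one_two_three n)

-- ===== LEMMAS AND PROOFS =====

-- the loop result in closed form
theorem nineLoop_eq (m : Int) (res : List Char) (h : 1 ≤ m) :
    nineLoop m res = (res ++ List.replicate ((m - 1) / 9).toNat '9', (m - 1) % 9 + 1) := by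
  fun_induction nineLoop m res with
  | case1 m res hgt ih =>
    rw [ih (by omega)]
    have hk : ((m - 1) / 9).toNat = ((m - 9 - 1) / 9).toNat + 1 := by omega
    have hm : (m - 9 - 1) % 9 = (m - 1) % 9 := by omega
    rw [hk, hm, List.replicate_succ, List.append_assoc]
    rfl
  | case2 m res hle =>
    have hk : ((m - 1) / 9).toNat = 0 := by omega
    have hm : (m - 1) % 9 + 1 = m := by omega
    rw [hk, hm, List.replicate_zero, List.append_nil]

theorem foldl_nines (k : Nat) (a : Int) :
    (List.replicate k '9').foldl (fun a c => a * 10 + ((c.toNat : Int) - 48)) a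
      = a * 10 ^ k + (10 ^ k - 1) := by
  induction k generalizing a with
  | zero => simp
  | succ k ih =>
    rw [List.replicate_succ, List.foldl_cons, ih]
    have : (('9'.toNat : Int) - 48) = 9 := by decide
    rw [this]; ring

-- the repunit 11…1 (t ones)
def rep : Nat → Int
  | 0 => 0
  | t + 1 => rep t + 10 ^ t

theorem foldl_ones (t : Nat) (a : Int) :
    (List.replicate t '1').foldl (fun a c => a * 10 + ((c.toNat : Int) - 48)) a
      = a * 10 ^ t + rep t := by
  induction t generalizing a with
  | zero => simp [rep]
  | succ t ih =>
    rw [List.replicate_succ, List.foldl_cons, ih]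
    have : (('1'.toNat : Int) - 48) = 1 := by decide
    rw [this, rep]; ring

theorem nine_mul_rep (t : Nat) : 9 * rep t = 10 ^ t - 1 := by
  induction t with
  | zero => simp [rep]
  | succ t ih => rw [rep]; rw [pow_succ]; omega

theorem rep_eq_floordiv (t : Nat) : PySem.Int.floordiv (10 ^ t - 1) 9 = rep t := by
  rw [PySem.Int.floordiv_eq_ediv_of_pos (by norm_num), ← nine_mul_rep t]
  exact Int.mul_ediv_cancel_left _ (by norm_num)

-- appending the final digit str(m), 1 ≤ m ≤ 9
theorem digit_fold (v m : Int) (h1 : 1 ≤ m) (h9 : m ≤ 9) :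
    (PySem.Int.toChars m).foldl (fun a c => a * 10 + ((c.toNat : Int) - 48)) v = v * 10 + m := by
  interval_cases m <;>
    simp only [show PySem.Int.toChars 1 = ['1'] from by decide,
          show PySem.Int.toChars 2 = ['2'] from by decide,
          show PySem.Int.toChars 3 = ['3'] from by decide,
          show PySem.Int.toChars 4 = ['4'] from by decide,
          show PySem.Int.toChars 5 = ['5'] from by decide,
          show PySem.Int.toChars 6 = ['6'] from by decide,
          show PySem.Int.toChars 7 = ['7'] from by decide,
          show PySem.Int.toChars 8 = ['8'] from by decide,
          show PySem.Int.toChars 9 = ['9'] from by decide,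
          List.foldl_cons, List.foldl_nil,
          show (('1'.toNat : Int) - 48) = 1 from by decide,
          show (('2'.toNat : Int) - 48) = 2 from by decide,
          show (('3'.toNat : Int) - 48) = 3 from by decide,
          show (('4'.toNat : Int) - 48) = 4 from by decide,
          show (('5'.toNat : Int) - 48) = 5 from by decide,
          show (('6'.toNat : Int) - 48) = 6 from by decide,
          show (('7'.toNat : Int) - 48) = 7 from by decide,
          show (('8'.toNat : Int) - 48) = 8 from by decide,
          show (('9'.toNat : Int) - 48) = 9 from by decide]

theorem ones_string (n : Int) :
    PySem.Chars.join [] ((PySem.List.pyRange 0 n 1).map (fun _ => PySem.Int.toChars (1 : Int)))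
      = List.replicate n.toNat '1' := by
  have h1 : PySem.Int.toChars (1 : Int) = ['1'] := by decide
  rw [h1]
  have : (PySem.List.pyRange 0 n 1).map (fun _ => (['1'] : List Char))
      = ((PySem.List.pyRange 0 n 1).map (fun _ => '1')).map (fun c => [c]) := by
    simp
  rw [this, PySem.Chars.join_nil_singletons]
  rw [List.map_const']
  simp [PySem.List.length_pyRange_one]

-- ===== VERDICT (by name: the statement is the Claim_ definition above) =====
theorem one_two_three_spec : Claim_equal_one_two_three := by
  intro n _ hpre
  unfold Spec_one_two_three
  by_cases h0 : n = 0
  · simp [one_two_three, one_two_three_alt, h0]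
  · have h1 : 1 ≤ n := by have := hpre; unfold Pre_one_two_three at this; omega
    unfold one_two_three one_two_three_alt
    rw [if_neg h0, if_neg h0]
    have hmod : PySem.Int.mod (n - 1) 9 = (n - 1) % 9 :=
      PySem.Int.mod_eq_emod_of_pos (by norm_num)
    have hdiv : PySem.Int.floordiv (n - ((n - 1) % 9 + 1)) 9 = (n - 1) / 9 := by
      rw [PySem.Int.floordiv_eq_ediv_of_pos (by norm_num)]
      omega
    have hm1 : 1 ≤ (n - 1) % 9 + 1 := by omega
    have hm9 : (n - 1) % 9 + 1 ≤ 9 := by omega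
    simp only [nineLoop_eq n [] h1, hmod, hdiv, List.nil_append, ones_string n,
      digitsToInt, List.foldl_append, foldl_nines, foldl_ones,
      digit_fold _ _ hm1 hm9, ← rep_eq_floordiv]
    norm_num
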